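-- pv_equiv track=rewrite | github.com/pypi-data/pypi-mirror-304 | packages/kaizen-cloudcode/kaizen_cloudcode-0.4.21-py3-none-any.whl/kaizen/formatters/code_review_formatter.py | create_stats_section
-- ===== SOURCE A (Python) =====
-- from typing import Dict, List
--
-- def create_stats_section(reviews: List[Dict]) -> str:
--     total_issues = len(reviews)
--     critical_issues = sum(
--         1 for review in reviews if review.get("impact", "") == "critical"
--     )
--     important_issues = sum(
--         1 for review in reviews if review.get("impact", "") == "important"
--     )
--     minor_issues = sum(
--         1 for review in reviews if review.get("impact", "") in ["moderate"]
--     )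
--     files_affected = len(set(review["file_path"] for review in reviews))
--
--     output = "## 📊 Stats\n"
--     output += f"- Total Issues: {total_issues}\n"
--     output += f"- Critical: {critical_issues}\n"
--     output += f"- Important: {important_issues}\n"
--     output += f"- Minor: {minor_issues}\n"
--     output += f"- Files Affected: {files_affected}\n"
--     return output
-- ===== SOURCE B (Python) =====
-- from typing import Dict, List
-- from collections import Counter
--
-- def create_stats_section(reviews: List[Dict]) -> str:
--     counts = Counter()
--     files = set()
--     for review in reviews:
--         counts[review.get("impact", "")] += 1
--         files.add(review["file_path"])
--     return (
--         "## 📊 Stats\n"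
--         f"- Total Issues: {len(reviews)}\n"
--         f"- Critical: {counts['critical']}\n"
--         f"- Important: {counts['important']}\n"
--         f"- Minor: {counts['moderate']}\n"
--         f"- Files Affected: {len(files)}\n"
--     )
-- ===== Notes on version B (the rewrite author's own statement) =====
-- stated objective: simpler
-- what changed: replaces four separate scans of reviews (three counting comprehensions and a set comprehension) with a single pass that builds a Counter of impact values and a set of file paths, then reads the stats from those tables
import Mathlib
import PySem

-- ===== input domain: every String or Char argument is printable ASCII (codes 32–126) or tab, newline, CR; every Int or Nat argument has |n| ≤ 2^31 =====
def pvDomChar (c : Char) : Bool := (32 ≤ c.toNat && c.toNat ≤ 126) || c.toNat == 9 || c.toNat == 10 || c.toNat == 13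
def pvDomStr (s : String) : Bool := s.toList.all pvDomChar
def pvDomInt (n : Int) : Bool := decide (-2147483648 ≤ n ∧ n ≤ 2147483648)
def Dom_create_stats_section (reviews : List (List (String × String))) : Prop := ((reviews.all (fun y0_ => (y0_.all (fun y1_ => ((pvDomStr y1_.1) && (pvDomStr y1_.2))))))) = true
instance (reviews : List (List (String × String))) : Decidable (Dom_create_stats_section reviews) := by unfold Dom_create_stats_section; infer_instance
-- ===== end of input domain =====

-- B replaces A's four separate scans of `reviews` by one pass building a Counter and a set;
-- the returned string is identical. Equivalence proved on Pre_ (every review has a "file_path" key).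

-- ===== PORT A =====
def create_stats_section (reviews : List (List (String × String))) : String :=
  let total_issues : Int := reviews.length
  let critical_issues : Int := reviews.foldl
    (fun acc review => if PySem.Dict.getD (PySem.Dict.mk review) "impact" "" == "critical" then acc + 1 else acc) 0
  let important_issues : Int := reviews.foldl
    (fun acc review => if PySem.Dict.getD (PySem.Dict.mk review) "impact" "" == "important" then acc + 1 else acc) 0
  let minor_issues : Int := reviews.foldl
    (fun acc review => if ["moderate"].contains (PySem.Dict.getD (PySem.Dict.mk review) "impact" "") then acc + 1 else acc) 0
  -- review["file_path"]: KeyError when absent; Pre_ guarantees the key is present, so getD's "" default is unreachable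
  let files_affected : Int := (PySem.Set.ofList (reviews.map (fun review => PySem.Dict.getD (PySem.Dict.mk review) "file_path" ""))).length
  let output := "## 📊 Stats\n"
  let output := output ++ "- Total Issues: " ++ PySem.Int.toStr total_issues ++ "\n"
  let output := output ++ "- Critical: " ++ PySem.Int.toStr critical_issues ++ "\n"
  let output := output ++ "- Important: " ++ PySem.Int.toStr important_issues ++ "\n"
  let output := output ++ "- Minor: " ++ PySem.Int.toStr minor_issues ++ "\n"
  let output := output ++ "- Files Affected: " ++ PySem.Int.toStr files_affected ++ "\n"
  output

-- ===== PORT B =====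
def create_stats_section_alt (reviews : List (List (String × String))) : String :=
  -- one loop: counts[review.get("impact","")] += 1; files.add(review["file_path"])
  let st : PySem.Dict String Int × PySem.Set String := reviews.foldl
    (fun st review =>
      (PySem.Dict.modify st.1 (PySem.Dict.getD (PySem.Dict.mk review) "impact" "") 0 (· + 1),
       PySem.Set.add st.2 (PySem.Dict.getD (PySem.Dict.mk review) "file_path" "")))
    (PySem.Dict.empty, PySem.Set.empty)
  "## 📊 Stats\n" ++
  "- Total Issues: " ++ PySem.Int.toStr reviews.length ++ "\n" ++
  "- Critical: " ++ PySem.Int.toStr (PySem.Dict.getD st.1 "critical" 0) ++ "\n" ++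
  "- Important: " ++ PySem.Int.toStr (PySem.Dict.getD st.1 "important" 0) ++ "\n" ++
  "- Minor: " ++ PySem.Int.toStr (PySem.Dict.getD st.1 "moderate" 0) ++ "\n" ++
  "- Files Affected: " ++ PySem.Int.toStr st.2.length ++ "\n"

-- ===== PRECONDITION & SPEC =====
-- Pre_ excludes exactly the reviews lacking a "file_path" key: there Python A raises KeyError (and B does too).
def Pre_create_stats_section (reviews : List (List (String × String))) : Prop :=
  ∀ review ∈ reviews, (PySem.Dict.get? (PySem.Dict.mk review) "file_path").isSome
instance (reviews : List (List (String × String))) : Decidable (Pre_create_stats_section reviews) := by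
  unfold Pre_create_stats_section; infer_instance
def pvWitness_create_stats_section : (List (List (String × String))) :=
  [[("file_path", "a.py"), ("impact", "critical")], [("file_path", "b.py")]]
def Spec_create_stats_section (reviews : List (List (String × String))) (out : String) : Prop := out = create_stats_section_alt reviews
instance (reviews : List (List (String × String))) (out : String) : Decidable (Spec_create_stats_section reviews out) := by unfold Spec_create_stats_section; infer_instance

-- ===== CLAIM (what is proved, stated in full; the proofs are below) =====
def Claim_equal_create_stats_section : Prop := ∀ (reviews : List (List (String × String))), Dom_create_stats_section reviews → Pre_create_stats_section reviews → Spec_create_stats_section reviews (create_stats_section reviews)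

-- ===== LEMMAS AND PROOFS =====

-- B's single fold over a pair splits into two independent folds
theorem pv_fold_pair (reviews : List (List (String × String)))
    (d : PySem.Dict String Int) (s : PySem.Set String) :
    reviews.foldl
      (fun st review =>
        (PySem.Dict.modify st.1 (PySem.Dict.getD (PySem.Dict.mk review) "impact" "") 0 (· + 1),
         PySem.Set.add st.2 (PySem.Dict.getD (PySem.Dict.mk review) "file_path" "")))
      (d, s)
    = (reviews.foldl (fun d review => PySem.Dict.modify d (PySem.Dict.getD (PySem.Dict.mk review) "impact" "") 0 (· + 1)) d,
       reviews.foldl (fun s review => PySem.Set.add s (PySem.Dict.getD (PySem.Dict.mk review) "file_path" "")) s) := by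
  induction reviews generalizing d s with
  | nil => rfl
  | cons r rest ih => simpa [List.foldl] using ih _ _

-- a fold with modify keyed through a function is the fold over the mapped keys
theorem pv_fold_modify_map (reviews : List (List (String × String)))
    (d : PySem.Dict String Int) :
    reviews.foldl (fun d review => PySem.Dict.modify d (PySem.Dict.getD (PySem.Dict.mk review) "impact" "") 0 (· + 1)) d
    = (reviews.map (fun review => PySem.Dict.getD (PySem.Dict.mk review) "impact" "")).foldl
        (fun d x => PySem.Dict.modify d x 0 (· + 1)) d := by
  induction reviews generalizing d with
  | nil => rfl
  | cons r rest ih => simpa [List.foldl] using ih _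

-- A's conditional count fold equals a count on the list of impact values
theorem pv_count_fold (reviews : List (List (String × String))) (v : String) (acc : Int) :
    reviews.foldl
      (fun acc review => if PySem.Dict.getD (PySem.Dict.mk review) "impact" "" == v then acc + 1 else acc) acc
    = acc + (reviews.map (fun review => PySem.Dict.getD (PySem.Dict.mk review) "impact" "")).count v := by
  induction reviews generalizing acc with
  | nil => simp
  | cons r rest ih =>
    simp only [List.foldl, List.map, List.count_cons]
    rw [ih]
    by_cases h : (PySem.Dict.getD (PySem.Dict.mk r) "impact" "" == v) = true
    · rw [if_pos h, if_pos h]; push_cast; ring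
    · rw [if_neg h, if_neg h]; push_cast; ring

-- B's counter lookup equals A's conditional count fold
theorem pv_counter_eq_count (reviews : List (List (String × String))) (v : String) :
    PySem.Dict.getD
      (reviews.foldl (fun d review => PySem.Dict.modify d (PySem.Dict.getD (PySem.Dict.mk review) "impact" "") 0 (· + 1)) (PySem.Dict.empty : PySem.Dict String Int))
      v 0
    = reviews.foldl
        (fun acc review => if PySem.Dict.getD (PySem.Dict.mk review) "impact" "" == v then acc + 1 else acc) (0 : Int) := by
  simp only [pv_fold_modify_map, PySem.Dict.getD_foldl_modify_add_one,
      PySem.Dict.getD_empty, pv_count_fold, zero_add]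

-- x in ["moderate"]  is  x == "moderate"
theorem pv_contains_singleton (x : String) :
    (["moderate"].contains x) = (x == "moderate") := by
  by_cases h : x = "moderate" <;> simp [h]

theorem create_stats_section_eq (reviews : List (List (String × String))) :
    create_stats_section reviews = create_stats_section_alt reviews := by
  unfold create_stats_section create_stats_section_alt
  rw [pv_fold_pair]
  simp only [pv_contains_singleton, pv_counter_eq_count,
    PySem.Set.ofList_eq_foldl, List.foldl_map, PySem.Set.empty]

-- ===== VERDICT (by name: the statement is the Claim_ definition above) =====
theorem create_stats_section_spec : Claim_equal_create_stats_section := by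
  intro reviews _ _
  show _ = _
  exact create_stats_section_eq reviews
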